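-- pv_equiv track=rewrite | github.com/JasonGross/coq-tools | coq_tools/diagnose_error.py | process_coqchk_output
-- ===== SOURCE A (Python) =====
-- def process_coqchk_output(output, v_file_name, line_count):
--     """
--     Process coqchk output and insert error preamble before "Fatal Error:" lines.
--
--     When coqchk outputs a line starting with "Fatal Error:", we emit a fake Coq
--     error location pointing to the end of the .v file before that line.
--     """
--     lines = output.split("\n")
--     result_lines = []
--     for line in lines:
--         if line.startswith("Fatal Error:"):
--             # Insert fake Coq error location before the Fatal Error line
--             result_lines.append(
--                 f'File "{v_file_name}", line {line_count}, characters 0-0:'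
--             )
--             result_lines.append("Error:")
--         result_lines.append(line)
--     return "\n".join(result_lines)
-- ===== SOURCE B (Python) =====
-- def process_coqchk_output(output, v_file_name, line_count):
--     """Single textual substitution: prepend a sentinel newline so every line start
--     (including the first) is "\n"-preceded, replace each "\nFatal Error:" with the
--     error preamble, then drop the sentinel."""
--     preamble = f'File "{v_file_name}", line {line_count}, characters 0-0:\nError:\nFatal Error:'
--     return ("\n" + output).replace("\nFatal Error:", "\n" + preamble)[1:]
-- ===== Notes on version B (the rewrite author's own statement) =====
-- stated objective: idiomatic
-- what changed: B replaces A's split('\n')/per-line loop/join pipeline by a single textual substitution: prepend a sentinel newline, do one str.replace of '\nFatal Error:' with the newline-led preamble, and drop the sentinel.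
import Mathlib
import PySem

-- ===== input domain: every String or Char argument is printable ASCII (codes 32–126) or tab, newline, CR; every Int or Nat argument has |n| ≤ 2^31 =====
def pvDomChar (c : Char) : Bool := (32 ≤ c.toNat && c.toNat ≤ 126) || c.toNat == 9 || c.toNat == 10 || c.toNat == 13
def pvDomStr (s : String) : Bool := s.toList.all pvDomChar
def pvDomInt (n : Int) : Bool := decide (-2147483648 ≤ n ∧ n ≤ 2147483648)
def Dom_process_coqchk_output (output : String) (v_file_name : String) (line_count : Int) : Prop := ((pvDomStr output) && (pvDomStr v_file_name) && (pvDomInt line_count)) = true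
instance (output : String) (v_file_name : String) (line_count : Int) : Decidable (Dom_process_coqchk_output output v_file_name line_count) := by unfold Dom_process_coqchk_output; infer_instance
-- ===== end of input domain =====

-- B replaces A's split/loop/join over lines by one textual substitution on the whole
-- string (a sentinel newline, one replace of "\nFatal Error:", drop the sentinel); same
-- cost, simpler shape (objective: idiomatic/alternative, not claimed faster).


-- ===== PORT A =====
-- the f-string f'File "{v_file_name}", line {line_count}, characters 0-0:' (char-list level)
def pvPreLine (v : List Char) (lc : Int) : List Char :=
  "File \"".toList ++ v ++ "\", line ".toList ++ (PySem.Int.toStr lc).toList ++ ", characters 0-0:".toList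

def process_coqchk_output (output : String) (v_file_name : String) (line_count : Int) : String :=
  let lines := PySem.Chars.splitOn output.toList "\n".toList
  let result_lines := lines.foldl (fun acc line =>
    if PySem.Chars.startswith line "Fatal Error:".toList then
      ((acc ++ [pvPreLine v_file_name.toList line_count]) ++ ["Error:".toList]) ++ [line]
    else acc ++ [line]) ([] : List (List Char))
  String.ofList (PySem.Chars.join "\n".toList result_lines)

-- ===== PORT B =====
def process_coqchk_output_alt (output : String) (v_file_name : String) (line_count : Int) : String :=
  let preamble := "File \"".toList ++ v_file_name.toList ++ "\", line ".toList
    ++ (PySem.Int.toStr line_count).toList ++ ", characters 0-0:\nError:\nFatal Error:".toList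
  String.ofList (PySem.Chars.slice
    (PySem.Chars.replace ("\n".toList ++ output.toList) "\nFatal Error:".toList ("\n".toList ++ preamble))
    (some 1) none)

-- ===== PRECONDITION & SPEC =====
def Spec_process_coqchk_output (output : String) (v_file_name : String) (line_count : Int) (out : String) : Prop := out = process_coqchk_output_alt output v_file_name line_count
instance (output : String) (v_file_name : String) (line_count : Int) (out : String) : Decidable (Spec_process_coqchk_output output v_file_name line_count out) := by unfold Spec_process_coqchk_output; infer_instance

-- ===== CLAIM (what is proved, stated in full; the proofs are below) =====
def Claim_equal_process_coqchk_output : Prop := ∀ (output : String) (v_file_name : String) (line_count : Int), Dom_process_coqchk_output output v_file_name line_count → Spec_process_coqchk_output output v_file_name line_count (process_coqchk_output output v_file_name line_count)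

-- ===== LEMMAS AND PROOFS =====

-- the pattern "Fatal Error:" and its newline-led variant
def pvPat : List Char := "Fatal Error:".toList
def pvPat0 : List Char := '\n' :: pvPat

-- fuel-free recursion computed by PySem.Chars.replace.go with pattern pvPat0
def pvRepR (nw : List Char) : List Char → List Char
  | [] => []
  | c :: t =>
      if pvPat0.isPrefixOf (c :: t) then nw ++ pvRepR nw (List.drop pvPat.length t)
      else c :: pvRepR nw t
termination_by l => l.length
decreasing_by
  all_goals simp

-- split on '\n', fuel-free
def pvConsHead (u : List Char) : List (List Char) → List (List Char)
  | [] => [u]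
  | x :: xs => (u ++ x) :: xs

def pvSplR : List Char → List (List Char)
  | [] => [[]]
  | c :: t => if c = '\n' then [] :: pvSplR t else pvConsHead [c] (pvSplR t)

-- common functional spec: copy, inserting `ins` right after each newline whose line starts with pvPat
def pvSpecG (ins : List Char) : List Char → List Char
  | [] => []
  | c :: t =>
      if c = '\n' then '\n' :: ((if pvPat.isPrefixOf t then ins else []) ++ pvSpecG ins t)
      else c :: pvSpecG ins t

-- what both programs insert before a matching line: preamble line, '\n', "Error:", '\n'
def pvIns (p : List Char) : List Char := p ++ '\n' :: ("Error:".toList ++ ['\n'])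

theorem pvReplace_go_spec (nw : List Char) : ∀ (fuel : Nat) (l acc : List Char), l.length ≤ fuel →
    PySem.Chars.replace.go pvPat0 nw fuel l acc = acc.reverse ++ pvRepR nw l := by
  intro fuel
  induction fuel with
  | zero =>
      intro l acc h
      have hl : l = [] := List.eq_nil_of_length_eq_zero (Nat.le_zero.mp h)
      subst hl
      rw [PySem.Chars.replace.go]; simp [pvRepR]
  | succ f ih =>
      intro l acc h
      cases l with
      | nil =>
          rw [PySem.Chars.replace.go]; simp [pvRepR]; omega
      | cons c t =>
          rw [PySem.Chars.replace.go, pvRepR]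
          by_cases hp : pvPat0.isPrefixOf (c :: t) = true
          · simp only [hp, if_pos]
            have hdrop : List.drop pvPat0.length (c :: t) = List.drop pvPat.length t := by
              show List.drop (pvPat.length + 1) (c :: t) = List.drop pvPat.length t
              rfl
            have hlen : (List.drop pvPat0.length (c :: t)).length ≤ f := by
              rw [hdrop]; simp at h ⊢; omega
            rw [ih _ _ hlen, hdrop]; simp
          · simp only [hp, Bool.false_eq_true, if_false]
            rw [ih t (c :: acc) (by simp at h ⊢; omega)]
            simp

theorem pvReplace_eq (nw s : List Char) :
    PySem.Chars.replace s pvPat0 nw = pvRepR nw s := by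
  rw [PySem.Chars.replace]
  have : pvPat0.isEmpty = false := by decide
  simp only [this]
  simpa using pvReplace_go_spec nw s.length s [] (le_refl _)

theorem pvSplR_ne_nil (t : List Char) : pvSplR t ≠ [] := by
  cases t with
  | nil => simp [pvSplR]
  | cons c t =>
      by_cases hc : c = '\n' <;> simp [pvSplR, hc]
      cases h : pvSplR t <;> simp [pvConsHead]

theorem pvSplitOn_go_spec : ∀ (fuel : Nat) (l cur : List Char) (acc : List (List Char)), l.length < fuel →
    PySem.Chars.splitOn.go ['\n'] fuel l cur acc = acc.reverse ++ pvConsHead cur.reverse (pvSplR l) := by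
  intro fuel
  induction fuel with
  | zero => intro l cur acc h; exact absurd h (Nat.not_lt_zero _)
  | succ f ih =>
      intro l cur acc h
      cases l with
      | nil =>
          rw [PySem.Chars.splitOn.go]; simp [pvSplR, pvConsHead]; omega
      | cons c t =>
          rw [PySem.Chars.splitOn.go]
          by_cases hc : c = '\n'
          · subst hc
            have hp : (['\n'] : List Char).isPrefixOf ('\n' :: t) = true := by simp [List.isPrefixOf]
            simp only [hp, if_pos]
            rw [ih _ _ _ (by simp at h ⊢; omega)]
            simp only [pvSplR]
            cases htl : pvSplR t with
            | nil => exact absurd htl (pvSplR_ne_nil t)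
            | cons x xs => simp [pvConsHead]; rw [htl]
          · have hp : (['\n'] : List Char).isPrefixOf (c :: t) = false := by
              simp [List.isPrefixOf]
              intro h'; exact absurd h'.symm hc
            simp only [hp, Bool.false_eq_true, if_false]
            rw [ih _ _ _ (by simp at h ⊢; omega)]
            simp only [pvSplR, if_neg hc]
            cases htl : pvSplR t with
            | nil => exact absurd htl (pvSplR_ne_nil t)
            | cons x xs => simp [pvConsHead]

theorem pvSplitOn_eq (s : List Char) : PySem.Chars.splitOn s ['\n'] = pvConsHead [] (pvSplR s) := by
  rw [PySem.Chars.splitOn]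
  simpa using pvSplitOn_go_spec (s.length + 1) s [] [] (by omega)

theorem pvJoin_cons (sep x : List Char) (xs : List (List Char)) :
    PySem.Chars.join sep (x :: xs) = x ++ xs.flatMap (fun y => sep ++ y) := by
  induction xs generalizing x with
  | nil => simp [PySem.Chars.join, List.intercalate]
  | cons y ys ih => simp [PySem.Chars.join, List.intercalate] at ih ⊢; simp [ih]

-- one processed line of A: the inserted lines (if any) then the line
def pvFl (p x : List Char) : List (List Char) :=
  if pvPat.isPrefixOf x then [p, "Error:".toList, x] else [x]

-- the inserted text, flattened: preamble line, newline, "Error:", newline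
-- (pvIns is defined above with the spec functions)

theorem pvFoldl_eq (p : List Char) (ls : List (List Char)) (acc : List (List Char)) :
    ls.foldl (fun acc line =>
      if PySem.Chars.startswith line "Fatal Error:".toList then
        ((acc ++ [p]) ++ ["Error:".toList]) ++ [line]
      else acc ++ [line]) acc = acc ++ ls.flatMap (pvFl p) := by
  induction ls generalizing acc with
  | nil => simp
  | cons x xs ih =>
      simp only [List.foldl_cons, List.flatMap_cons, ih]
      have hc : PySem.Chars.startswith x "Fatal Error:".toList = pvPat.isPrefixOf x := rfl
      rw [hc]
      unfold pvFl
      split <;> simp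

theorem pvFlat (p : List Char) (ys : List (List Char)) :
    (ys.flatMap (pvFl p)).flatMap (fun y => '\n' :: y) =
      ys.flatMap (fun y => '\n' :: ((if pvPat.isPrefixOf y then pvIns p else []) ++ y)) := by
  induction ys with
  | nil => simp
  | cons y ys ih =>
      simp only [List.flatMap_cons, List.flatMap_append, ih, pvFl]
      split <;> simp [pvIns]

theorem pvJ_cons (p x : List Char) (xs : List (List Char)) :
    PySem.Chars.join ['\n'] ((x :: xs).flatMap (pvFl p)) =
      ((if pvPat.isPrefixOf x then pvIns p else []) ++ x) ++
        xs.flatMap (fun y => '\n' :: ((if pvPat.isPrefixOf y then pvIns p else []) ++ y)) := by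
  simp only [List.flatMap_cons]
  by_cases hx : pvPat.isPrefixOf x = true
  · simp only [pvFl, hx, if_pos]
    rw [show ([p, "Error:".toList, x] : List (List Char)) ++ xs.flatMap (pvFl p) =
      p :: ("Error:".toList :: x :: xs.flatMap (pvFl p)) from rfl, pvJoin_cons]
    simp [pvIns, pvFlat]
  · simp only [pvFl, hx, Bool.false_eq_true, if_false]
    rw [show ([x] : List (List Char)) ++ xs.flatMap (pvFl p) = x :: xs.flatMap (pvFl p) from rfl,
      pvJoin_cons]
    simp [pvFlat]

theorem pvSpecG_append (ins u r : List Char) (hu : '\n' ∉ u) : pvSpecG ins (u ++ r) = u ++ pvSpecG ins r := by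
  induction u with
  | nil => simp
  | cons c u ih =>
      have hc : c ≠ '\n' := fun h => hu (h ▸ List.mem_cons_self ..)
      simp only [List.cons_append, pvSpecG, if_neg hc]
      rw [ih (fun h => hu (List.mem_cons_of_mem _ h))]

theorem pvPrefix_nl (pq : List Char) (hnp : '\n' ∉ pq) : ∀ (u t : List Char), '\n' ∉ u →
    pq.isPrefixOf (u ++ '\n' :: t) = pq.isPrefixOf u := by
  induction pq with
  | nil => intro u t _; simp [List.isPrefixOf]
  | cons a pq ih =>
      intro u t hu
      have ha : a ≠ '\n' := fun h => hnp (h ▸ List.mem_cons_self ..)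
      cases u with
      | nil => simp [List.isPrefixOf, ha]
      | cons b u =>
          simp only [List.cons_append, List.isPrefixOf]
          rw [ih (fun h => hnp (List.mem_cons_of_mem _ h)) u t
            (fun h => hu (List.mem_cons_of_mem _ h))]

theorem pvA_main (p : List Char) : ∀ (s u : List Char), '\n' ∉ u →
    PySem.Chars.join ['\n'] ((pvConsHead u (pvSplR s)).flatMap (pvFl p)) =
      (if pvPat.isPrefixOf (u ++ s) then pvIns p else []) ++ u ++ pvSpecG (pvIns p) s := by
  intro s
  induction s with
  | nil =>
      intro u hu
      simp only [pvSplR, pvConsHead, List.append_nil, pvSpecG]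
      rw [pvJ_cons]
      simp
  | cons c t ih =>
      intro u hu
      by_cases hc : c = '\n'
      · subst hc
        have hcons : ∃ x xs, pvSplR t = x :: xs := by
          cases h : pvSplR t with
          | nil => exact absurd h (pvSplR_ne_nil t)
          | cons x xs => exact ⟨x, xs, rfl⟩
        obtain ⟨x, xs, hx⟩ := hcons
        have e1 : pvConsHead u (pvSplR ('\n' :: t)) = u :: x :: xs := by
          rw [show pvSplR ('\n' :: t) = [] :: pvSplR t from by simp [pvSplR], hx]
          simp [pvConsHead]
        rw [e1, pvJ_cons]
        have hind := ih [] (by simp)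
        rw [hx] at hind
        simp only [pvConsHead, List.nil_append] at hind
        rw [pvJ_cons] at hind
        -- join over u :: (x :: xs): head-part of u, then newline, then A's value on t
        have e2 : (x :: xs).flatMap (fun y => '\n' :: ((if pvPat.isPrefixOf y then pvIns p else []) ++ y)) =
            '\n' :: (((if pvPat.isPrefixOf x then pvIns p else []) ++ x) ++
              xs.flatMap (fun y => '\n' :: ((if pvPat.isPrefixOf y then pvIns p else []) ++ y))) := by
          simp
        rw [e2, hind]
        rw [pvPrefix_nl pvPat (by decide) u t hu]
        have e3 : pvSpecG (pvIns p) ('\n' :: t) =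
            '\n' :: ((if pvPat.isPrefixOf t then pvIns p else []) ++ pvSpecG (pvIns p) t) := by
          simp [pvSpecG]
        rw [e3]
        by_cases hup : pvPat.isPrefixOf u = true <;> by_cases htp : pvPat.isPrefixOf t = true <;>
          simp [hup, htp]
      · simp only [pvSplR, if_neg hc]
        have hstep : pvConsHead u (pvConsHead [c] (pvSplR t)) = pvConsHead (u ++ [c]) (pvSplR t) := by
          cases pvSplR t <;> simp [pvConsHead]
        rw [hstep]
        have hu' : '\n' ∉ u ++ [c] := by
          intro h
          rcases List.mem_append.mp h with h | h
          · exact hu h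
          · simp at h; exact hc h.symm
        rw [ih (u ++ [c]) hu']
        have h1 : (u ++ [c]) ++ t = u ++ c :: t := by simp
        have h2 : pvSpecG (pvIns p) (c :: t) = c :: pvSpecG (pvIns p) t := by
          simp [pvSpecG, hc]
        rw [h1, h2]
        simp

theorem pvB_main (p : List Char) (t : List Char) :
    pvRepR ('\n' :: (pvIns p ++ pvPat)) t = pvSpecG (pvIns p) t := by
  have H : ∀ (n : Nat) (t : List Char), t.length ≤ n →
      pvRepR ('\n' :: (pvIns p ++ pvPat)) t = pvSpecG (pvIns p) t := by
    intro n
    induction n with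
    | zero =>
        intro t h
        have : t = [] := List.eq_nil_of_length_eq_zero (Nat.le_zero.mp h)
        subst this; simp [pvRepR, pvSpecG]
    | succ n ih =>
        intro t h
        cases t with
        | nil => simp [pvRepR, pvSpecG]
        | cons c t =>
            by_cases hc : c = '\n'
            · subst hc
              by_cases hpt : pvPat.isPrefixOf t = true
              · have hp0 : pvPat0.isPrefixOf ('\n' :: t) = true := by
                  simp [pvPat0, hpt]
                rw [pvRepR, if_pos hp0]
                obtain ⟨r, hr⟩ := List.isPrefixOf_iff_prefix.mp hpt
                have hdrop : List.drop pvPat.length t = r := by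
                  rw [← hr]; simp
                rw [hdrop]
                have hrlen : r.length ≤ n := by
                  have := congrArg List.length hr
                  simp at this h
                  omega
                rw [ih r hrlen]
                have : pvSpecG (pvIns p) ('\n' :: t) =
                    '\n' :: (pvIns p ++ pvSpecG (pvIns p) t) := by
                  simp [pvSpecG, hpt]
                rw [this, ← hr, pvSpecG_append _ _ _ (by decide)]
                simp
              · have hp0 : pvPat0.isPrefixOf ('\n' :: t) = false := by
                  simp [pvPat0, hpt]
                rw [pvRepR, if_neg (by simp [hp0])]
                rw [ih t (by simp at h; omega)]
                simp [pvSpecG, hpt]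
            · have hp0 : pvPat0.isPrefixOf (c :: t) = false := by
                simp [pvPat0, List.isPrefixOf]
                intro h'; exact absurd h'.symm hc
              rw [pvRepR, if_neg (by simp [hp0])]
              rw [ih t (by simp at h; omega)]
              simp [pvSpecG, hc]
  exact H t.length t (le_refl _)

-- ===== VERDICT (by name: the statement is the Claim_ definition above) =====
theorem process_coqchk_output_spec : Claim_equal_process_coqchk_output := by
  unfold Claim_equal_process_coqchk_output Spec_process_coqchk_output
  intro output v_file_name line_count _
  unfold process_coqchk_output process_coqchk_output_alt
  simp only []
  set s := output.toList with hs
  set p := pvPreLine v_file_name.toList line_count with hp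
  -- A side
  have hnl : ("\n".toList : List Char) = ['\n'] := by decide
  have hfe : ("Fatal Error:".toList : List Char) = pvPat := rfl
  rw [hnl, pvFoldl_eq p, List.nil_append, pvSplitOn_eq, pvA_main p s [] (by simp)]
  -- B side
  have hpre : (['\n'] : List Char) ++ ("File \"".toList ++ v_file_name.toList ++ "\", line ".toList
      ++ (PySem.Int.toStr line_count).toList ++ ", characters 0-0:\nError:\nFatal Error:".toList)
      = '\n' :: (pvIns p ++ pvPat) := by
    have : (", characters 0-0:\nError:\nFatal Error:".toList : List Char) =
        ", characters 0-0:".toList ++ '\n' :: ("Error:".toList ++ '\n' :: "Fatal Error:".toList) := by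
      decide
    rw [this]
    simp [pvIns, pvPreLine, pvPat, hp]
  have hpat0 : ("\nFatal Error:".toList : List Char) = pvPat0 := by decide
  rw [hpat0, hpre, pvReplace_eq]
  rw [show (['\n'] : List Char) ++ s = '\n' :: s from rfl, pvB_main p ('\n' :: s)]
  have hsg : pvSpecG (pvIns p) ('\n' :: s) =
      '\n' :: ((if pvPat.isPrefixOf s then pvIns p else []) ++ pvSpecG (pvIns p) s) := by
    simp [pvSpecG]
  have hslice : ∀ (L : List Char), PySem.Chars.slice ('\n' :: L) (some 1) none = L := by
    intro L
    simp [PySem.Chars.slice_eq_listSlice, PySem.List.slice]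
  rw [hsg, hslice]
  simp
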